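-- pv_equiv track=rewrite | github.com/KennethAdamMiller/superset_disassembler | scripts/calculate_metrics.py | indexes_of
-- ===== SOURCE A (Python) =====
-- def indexes_of(items, to_find):
--     to_find=set(to_find)
--     found=set()
--     idx=0
--     for item in items:
--         if item in to_find and idx not in found:
--             found.add(idx)
--         idx+=1
--     return sorted(found)
-- ===== SOURCE B (Python) =====
-- def indexes_of(items, to_find):
--     index = {}
--     for i, v in enumerate(items):
--         index.setdefault(v, []).append(i)
--     result = []
--     for v in set(to_find):
--         result.extend(index.get(v, []))
--     return sorted(result)
-- ===== Notes on version B (the rewrite author's own statement) =====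
-- stated objective: alternative
-- what changed: Replaces A's scan-with-membership-test-and-found-set by building an inverted index (value -> list of indices) in one pass, then collecting the index lists of the distinct target values and sorting.
import Mathlib
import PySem

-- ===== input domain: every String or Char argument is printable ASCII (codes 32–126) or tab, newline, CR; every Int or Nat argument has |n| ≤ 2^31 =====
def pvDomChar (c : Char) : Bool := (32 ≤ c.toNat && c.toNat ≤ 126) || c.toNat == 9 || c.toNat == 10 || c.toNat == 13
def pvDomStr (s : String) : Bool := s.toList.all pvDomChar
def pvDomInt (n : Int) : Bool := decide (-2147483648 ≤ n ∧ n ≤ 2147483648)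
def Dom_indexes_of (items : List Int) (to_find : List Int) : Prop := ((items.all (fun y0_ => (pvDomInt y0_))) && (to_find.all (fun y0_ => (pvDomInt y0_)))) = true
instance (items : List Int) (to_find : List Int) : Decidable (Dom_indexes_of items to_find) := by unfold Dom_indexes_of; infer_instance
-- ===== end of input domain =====

-- B replaces A's found-set scan by an inverted index (value -> indices) plus lookups over the
-- distinct targets; same result, alternative algorithm (no speed claim).


-- ===== PORT A =====
def indexes_of (items : List Int) (to_find : List Int) : List Int :=
  let tf : PySem.Set Int := PySem.Set.ofList to_find
  let fin := items.foldl
    (fun (st : PySem.Set Int × Int) item =>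
      if PySem.Set.contains tf item && !(PySem.Set.contains st.1 st.2) then
        (PySem.Set.add st.1 st.2, st.2 + 1)
      else (st.1, st.2 + 1))
    (PySem.Set.empty, 0)
  PySem.List.sorted fin.1 (fun x => x) false

-- ===== PORT B =====
def indexes_of_alt (items : List Int) (to_find : List Int) : List Int :=
  let index : PySem.Dict Int (List Int) :=
    (PySem.List.enumerate items).foldl
      (fun d p => d.modify p.2 [] (· ++ [p.1])) PySem.Dict.empty
  let result := (PySem.Set.ofList to_find).foldl (fun acc v => acc ++ index.getD v []) []
  PySem.List.sorted result (fun x => x) false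

-- ===== PRECONDITION & SPEC =====
def Spec_indexes_of (items : List Int) (to_find : List Int) (out : List Int) : Prop := out = indexes_of_alt items to_find
instance (items : List Int) (to_find : List Int) (out : List Int) : Decidable (Spec_indexes_of items to_find out) := by unfold Spec_indexes_of; infer_instance

-- ===== CLAIM (what is proved, stated in full; the proofs are below) =====
def Claim_equal_indexes_of : Prop := ∀ (items : List Int) (to_find : List Int), Dom_indexes_of items to_find → Spec_indexes_of items to_find (indexes_of items to_find)

-- ===== LEMMAS AND PROOFS =====

-- the canonical answer: indices of items whose value is a target, in position order
def canonIdx (items : List Int) (tf : PySem.Set Int) : List Int :=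
  ((PySem.List.enumerate items).filter (fun p => PySem.Set.contains tf p.2)).map (·.1)

-- A's loop accumulates exactly the canonical indices (shifted by the start counter)
lemma aLoop (tf : PySem.Set Int) (l : List Int) (s : PySem.Set Int) (k : Int)
    (h : ∀ x ∈ s, x < k) :
    (l.foldl
      (fun (st : PySem.Set Int × Int) item =>
        if PySem.Set.contains tf item && !(PySem.Set.contains st.1 st.2) then
          (PySem.Set.add st.1 st.2, st.2 + 1)
        else (st.1, st.2 + 1)) (s, k)).1
    = s ++ ((PySem.List.enumerate l k).filter (fun p => PySem.Set.contains tf p.2)).map (·.1) := by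
  induction l generalizing s k with
  | nil => simp
  | cons x xs ih =>
    have hkm : k ∉ s := fun hm => absurd (h k hm) (lt_irrefl k)
    have hk : PySem.Set.contains s k = false := by
      simp only [PySem.Set.contains, List.contains_eq_mem, decide_eq_false_iff_not]
      exact hkm
    simp only [List.foldl_cons, PySem.List.enumerate_cons, List.filter_cons]
    by_cases hx : PySem.Set.contains tf x = true
    · have hadd : PySem.Set.add s k = s ++ [k] := by simp [PySem.Set.add, PySem.Set.contains, hkm]
      simp only [hx, hk, Bool.not_false, Bool.and_true, if_pos, hadd]
      rw [ih (s ++ [k]) (k + 1) (by intro y hy; rcases List.mem_append.1 hy with h1 | h1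
                                    · exact lt_trans (h y h1) (by omega)
                                    · simp at h1; omega)]
      simp
    · have hx' : PySem.Set.contains tf x = false := by simpa using hx
      simp only [hx', Bool.false_and, if_neg Bool.false_ne_true]
      rw [ih s (k + 1) (fun y hy => lt_trans (h y hy) (by omega))]

-- a flatMap entry over values a does not match contributes nothing extra
lemma flatMap_skip (S : List Int) (a : Int) (b : Int) (f : Int → List Int)
    (ha : a ∉ S) :
    S.flatMap (fun v => (if a == v then [b] else []) ++ f v) = S.flatMap f := by
  induction S with
  | nil => rfl
  | cons v S ih =>
    have hav : (a == v) = false := by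
      simp only [beq_eq_false_iff_ne]; intro hv; exact ha (hv ▸ List.mem_cons_self ..)
    simp only [List.flatMap_cons, hav, if_neg Bool.false_ne_true, List.nil_append,
      ih (fun hm => ha (List.mem_cons_of_mem _ hm))]

-- pulling one matched element out of a flatMap over a duplicate-free value list
lemma flatMap_pull (S : List Int) (hS : S.Nodup) (a : Int) (b : Int) (f : Int → List Int) :
    (S.flatMap (fun v => (if a == v then [b] else []) ++ f v)).Perm
      ((if decide (a ∈ S) = true then [b] else []) ++ S.flatMap f) := by
  induction S with
  | nil => simp
  | cons v S ih =>
    rcases List.nodup_cons.1 hS with ⟨hvS, hS'⟩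
    by_cases hav : a = v
    · subst hav
      have : a ∉ S := hvS
      simp only [List.flatMap_cons, BEq.refl, if_pos, flatMap_skip S a b f this]
      simp [List.mem_cons]
    · have hav' : (a == v) = false := by simpa using hav
      simp only [List.flatMap_cons, hav', if_neg Bool.false_ne_true, List.nil_append]
      have hmem : decide (a ∈ v :: S) = decide (a ∈ S) := by
        simp [List.mem_cons, hav]
      rw [hmem]
      refine ((ih hS').append_left (f v)).trans ?_
      rw [← List.append_assoc, ← List.append_assoc]
      exact (List.perm_append_comm.append_right _)

-- grouping: flatMap over a nodup value list of "entries with that key" permutes the filter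
lemma flatMap_group_perm (S : List Int) (hS : S.Nodup) (l : List (Int × Int)) :
    (S.flatMap (fun v => (l.filter (fun p => p.2 == v)).map (·.1))).Perm
      ((l.filter (fun p => decide (p.2 ∈ S))).map (·.1)) := by
  induction l with
  | nil => simp
  | cons p l ih =>
    have hstep : (fun v => ((p :: l).filter (fun q => q.2 == v)).map (·.1))
        = fun v => (if p.2 == v then [p.1] else []) ++ (l.filter (fun q => q.2 == v)).map (·.1) := by
      funext v
      by_cases hpv : (p.2 == v) = true
      · simp [hpv]
      · simp [Bool.eq_false_iff.2 hpv]
    rw [hstep]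
    refine (flatMap_pull S hS p.2 p.1 _).trans ?_
    refine (ih.append_left _).trans ?_
    have : ((p :: l).filter (fun q => decide (q.2 ∈ S))).map (·.1)
        = (if decide (p.2 ∈ S) = true then [p.1] else [])
            ++ (l.filter (fun q => decide (q.2 ∈ S))).map (·.1) := by
      by_cases hm : p.2 ∈ S
      · simp [hm]
      · simp [hm]
    rw [this]

lemma canon_pairwise (items : List Int) (tf : PySem.Set Int) :
    (canonIdx items tf).Pairwise (fun a b => a < b) := by
  unfold canonIdx
  rw [List.pairwise_map]
  exact ((PySem.List.pairwise_lt_enumerate items 0).sublist List.filter_sublist)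

-- B's dictionary at key v holds exactly the indices whose item equals v, in order
lemma bGetD (items : List Int) (v : Int) :
    ((PySem.List.enumerate items).foldl
      (fun (d : PySem.Dict Int (List Int)) p => d.modify p.2 [] (· ++ [p.1]))
      PySem.Dict.empty).getD v []
    = ((PySem.List.enumerate items).filter (fun p => p.2 == v)).map (·.1) := by
  have hswap : (PySem.List.enumerate items).foldl
      (fun (d : PySem.Dict Int (List Int)) p => d.modify p.2 [] (· ++ [p.1])) PySem.Dict.empty
      = ((PySem.List.enumerate items).map Prod.swap).foldl
          (fun d q => d.modify q.1 [] (· ++ [q.2])) PySem.Dict.empty := by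
    rw [List.foldl_map]
    congr 1
  rw [hswap, PySem.Dict.getD_foldl_modify_append]
  simp [List.filter_map, Function.comp_def]

-- ===== VERDICT (by name: the statement is the Claim_ definition above) =====
theorem indexes_of_spec : Claim_equal_indexes_of := by
  intro items to_find _
  unfold Spec_indexes_of indexes_of indexes_of_alt
  set tf : PySem.Set Int := PySem.Set.ofList to_find with htf
  have hA : (items.foldl
      (fun (st : PySem.Set Int × Int) item =>
        if PySem.Set.contains tf item && !(PySem.Set.contains st.1 st.2) then
          (PySem.Set.add st.1 st.2, st.2 + 1)
        else (st.1, st.2 + 1)) (PySem.Set.empty, 0)).1 = canonIdx items tf := by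
    rw [aLoop tf items PySem.Set.empty 0 (by intro x hx; simp [PySem.Set.empty] at hx)]
    simp [canonIdx]
  have hAside := PySem.List.sorted_eq_of_perm_of_pairwise_lt _ (canonIdx items tf)
      (fun x => x) (List.Perm.of_eq hA.symm) (canon_pairwise items tf)
  have hBres : (tf.foldl (fun acc v => acc ++ ((PySem.List.enumerate items).foldl
        (fun (d : PySem.Dict Int (List Int)) p => d.modify p.2 [] (· ++ [p.1]))
        PySem.Dict.empty).getD v []) []) =
      tf.flatMap (fun v => ((PySem.List.enumerate items).filter (fun p => p.2 == v)).map (·.1)) := by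
    rw [PySem.List.foldl_append_eq_flatMap, List.nil_append]
    exact List.flatMap_congr (fun v _ => bGetD items v)
  have hperm : (canonIdx items tf).Perm (tf.foldl (fun acc v => acc ++
      ((PySem.List.enumerate items).foldl
        (fun (d : PySem.Dict Int (List Int)) p => d.modify p.2 [] (· ++ [p.1]))
        PySem.Dict.empty).getD v []) []) := by
    rw [hBres]
    refine List.Perm.symm ?_
    have := flatMap_group_perm tf (htf ▸ PySem.Set.nodup_ofList to_find) (PySem.List.enumerate items)
    refine this.trans ?_
    have heq : ((PySem.List.enumerate items).filter (fun p => decide (p.2 ∈ tf))).map (·.1)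
        = canonIdx items tf := by
      unfold canonIdx
      congr 1
      apply List.filter_congr
      intro p _
      simp [PySem.Set.contains, List.contains_eq_mem]
    rw [heq]
  have hBside := PySem.List.sorted_eq_of_perm_of_pairwise_lt _ (canonIdx items tf)
      (fun x => x) hperm (canon_pairwise items tf)
  simp only [hAside, hBside]
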